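-- pv_equiv track=rewrite | github.com/filipskalicky/odptorevealjs | py/configuration.py | toRegex
-- ===== SOURCE A (Python) =====
-- def toRegex(input):
--     bad = ['+', '?', '\\']
--     novy = "^"
--     for i,x in enumerate(input):
--         if x in bad:
--             novy += "\\"
--             novy += x
--         else:
--             novy += x
--     novy += "$"
--     return novy
-- ===== SOURCE B (Python) =====
-- def toRegex(input):
--     # Escape by whole-string replace passes (backslash first), then anchor.
--     return "^" + input.replace("\\", "\\\\").replace("+", "\\+").replace("?", "\\?") + "$"
-- ===== Notes on version B (the rewrite author's own statement) =====
-- stated objective: idiomatic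
-- what changed: Replaces the char-by-char loop with an accumulator by three whole-string str.replace passes (backslash escaped first so later escapes are not re-escaped) plus anchor concatenation.
import Mathlib
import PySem

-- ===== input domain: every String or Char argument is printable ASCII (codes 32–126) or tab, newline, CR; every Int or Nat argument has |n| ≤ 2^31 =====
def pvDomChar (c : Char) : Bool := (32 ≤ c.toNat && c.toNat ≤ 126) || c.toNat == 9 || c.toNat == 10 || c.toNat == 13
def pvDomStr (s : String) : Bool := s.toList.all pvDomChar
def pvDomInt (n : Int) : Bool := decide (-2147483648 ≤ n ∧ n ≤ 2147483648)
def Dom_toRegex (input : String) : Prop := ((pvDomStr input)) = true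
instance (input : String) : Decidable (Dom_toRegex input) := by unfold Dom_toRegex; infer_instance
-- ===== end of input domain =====

-- B escapes via three whole-string replace passes (backslash first) instead of A's char-by-char loop; objective: idiomatic.


-- ===== PORT A =====
def toRegex (input : String) : String :=
  let bad : List Char := ['+', '?', '\\']
  let novy := (PySem.List.enumerate input.toList).foldl
    (fun novy ix =>
      if ix.2 ∈ bad then (novy ++ "\\") ++ String.singleton ix.2
      else novy ++ String.singleton ix.2) "^"
  novy ++ "$"

-- ===== PORT B =====
def toRegex_alt (input : String) : String :=
  "^" ++ PySem.Str.replace (PySem.Str.replace (PySem.Str.replace input "\\" "\\\\") "+" "\\+") "?" "\\?" ++ "$"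

-- ===== PRECONDITION & SPEC =====
def Spec_toRegex (input : String) (out : String) : Prop := out = toRegex_alt input
instance (input : String) (out : String) : Decidable (Spec_toRegex input out) := by unfold Spec_toRegex; infer_instance

-- ===== CLAIM (what is proved, stated in full; the proofs are below) =====
def Claim_equal_toRegex : Prop := ∀ (input : String), Dom_toRegex input → Spec_toRegex input (toRegex input)

-- ===== LEMMAS AND PROOFS =====

/-- The fully escaped form of one character. -/
def pvEsc (c : Char) : List Char :=
  if c = '+' ∨ c = '?' ∨ c = '\\' then ['\\', c] else [c]

/-- Replacement of a single character, pointwise. -/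
def pvRep (c : Char) (new : List Char) (x : Char) : List Char :=
  if x = c then new else [x]

theorem pv_go_singleton (c : Char) (new : List Char) :
    ∀ (l : List Char) (fuel : Nat) (acc : List Char), l.length ≤ fuel →
      PySem.Chars.replace.go [c] new fuel l acc = acc.reverse ++ l.flatMap (pvRep c new) := by
  intro l
  induction l with
  | nil =>
      intro fuel acc _
      cases fuel <;> simp [PySem.Chars.replace.go]
  | cons x t ih =>
      intro fuel acc h
      cases fuel with
      | zero => simp at h
      | succ f =>
          by_cases hx : x = c
          · subst hx
            have hpre : List.isPrefixOf [x] (x :: t) = true := by simp [List.isPrefixOf]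
            simp only [PySem.Chars.replace.go, hpre, if_true]
            have hdrop : List.drop [x].length (x :: t) = t := rfl
            rw [hdrop, ih f (new.reverse ++ acc) (by simpa using h)]
            simp [pvRep]
          · have hpre : List.isPrefixOf [c] (x :: t) = false := by
              simp [List.isPrefixOf]
              exact fun h' => hx h'.symm
            simp only [PySem.Chars.replace.go, hpre, Bool.false_eq_true, if_false]
            rw [ih f (x :: acc) (by simpa using h)]
            simp [pvRep, hx]

theorem pv_replace_singleton (s : List Char) (c : Char) (new : List Char) :
    PySem.Chars.replace s [c] new = s.flatMap (pvRep c new) := by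
  simpa [PySem.Chars.replace] using pv_go_singleton c new s s.length [] le_rfl

theorem pv_fm_fm {α β γ : Type} (l : List α) (f : α → List β) (g : β → List γ) :
    (l.flatMap f).flatMap g = l.flatMap (fun x => (f x).flatMap g) := by
  induction l with
  | nil => simp
  | cons x t ih => simp [List.flatMap_cons, ih]

theorem pv_chain (s : List Char) :
    ((s.flatMap (pvRep '\\' ['\\', '\\'])).flatMap (pvRep '+' ['\\', '+'])).flatMap
        (pvRep '?' ['\\', '?']) = s.flatMap pvEsc := by
  rw [pv_fm_fm, pv_fm_fm]
  refine List.flatMap_congr (fun x _ => ?_)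
  by_cases h1 : x = '\\' <;> by_cases h2 : x = '+' <;> by_cases h3 : x = '?' <;>
    simp_all [pvRep, pvEsc]

theorem pv_foldA (l : List Char) :
    ∀ (i : Int) (acc : String),
      ((PySem.List.enumerate l i).foldl
        (fun novy ix =>
          if ix.2 ∈ (['+', '?', '\\'] : List Char) then (novy ++ "\\") ++ String.singleton ix.2
          else novy ++ String.singleton ix.2) acc).toList = acc.toList ++ l.flatMap pvEsc := by
  induction l with
  | nil => intro i acc; simp [PySem.List.enumerate_nil]
  | cons x t ih =>
      intro i acc
      rw [PySem.List.enumerate_cons, List.foldl_cons]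
      by_cases hx : x ∈ (['+', '?', '\\'] : List Char)
      · rw [if_pos hx, ih]
        have hesc : pvEsc x = ['\\', x] := by
          simp only [List.mem_cons, List.not_mem_nil, or_false] at hx
          rcases hx with h | h | h <;> simp [pvEsc, h]
        simp [hesc]
      · rw [if_neg hx, ih]
        have hesc : pvEsc x = [x] := by
          simp only [List.mem_cons, List.not_mem_nil, or_false, not_or] at hx
          simp [pvEsc, hx.1, hx.2.1, hx.2.2]
        simp [hesc]

-- ===== VERDICT (by name: the statement is the Claim_ definition above) =====
theorem toRegex_spec : Claim_equal_toRegex := by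
  intro input _
  unfold Spec_toRegex toRegex toRegex_alt
  rw [← String.toList_inj]
  simp only [String.toList_append, PySem.Str.toList_replace]
  have hb : ("\\" : String).toList = ['\\'] := rfl
  have hbb : ("\\\\" : String).toList = ['\\', '\\'] := rfl
  have hp : ("+" : String).toList = ['+'] := rfl
  have hbp : ("\\+" : String).toList = ['\\', '+'] := rfl
  have hq : ("?" : String).toList = ['?'] := rfl
  have hbq : ("\\?" : String).toList = ['\\', '?'] := rfl
  rw [hb, hbb, hp, hbp, hq, hbq,
    pv_replace_singleton, pv_replace_singleton, pv_replace_singleton, pv_chain]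
  rw [pv_foldA]
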